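-- pv_equiv track=rewrite | github.com/pypi-data/pypi-mirror-8 | packages/tmuxomatic/tmuxomatic-2.13.tar.gz/tmuxomatic-2.13/windowgram/windowgram.py | direction_to_axiswithflag
-- ===== SOURCE A (Python) =====
-- valid_directions = [ # These directions are recognized, the list is ordered 0123 == TBRL || NSEW
--     [ "top", "t", "tp",     "north", "n",   "up", "u", "over", "above",     ],  # ix == 0 -> Vertical +
--     [ "bottom", "b", "bt",  "south", "s",   "down", "d", "under", "below",  ],  # ix == 1 -> Vertical -
--     [ "right", "r", "rt",   "east", "e"                                     ],  # ix == 2 -> Horizontal -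
--     [ "left", "l", "lt",    "west", "w"                                     ],  # ix == 3 -> Horizontal +
-- ]
--
-- def direction_to_axiswithflag(direction): # axis_as_vh, negate_flag | None, None
--     for ix, directions_ent in enumerate(valid_directions):
--         if True in [True if d.lower().strip() == direction.lower().strip() else False for d in directions_ent]:
--             if ix == 0: return "v", False   # Top
--             if ix == 1: return "v", True    # Bottom
--             if ix == 2: return "h", True    # Right
--             if ix == 3: return "h", False   # Left
--     return None, None
-- ===== SOURCE B (Python) =====
-- valid_directions = [ # These directions are recognized, the list is ordered 0123 == TBRL || NSEW
--     [ "top", "t", "tp",     "north", "n",   "up", "u", "over", "above",     ],  # ix == 0 -> Vertical +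
--     [ "bottom", "b", "bt",  "south", "s",   "down", "d", "under", "below",  ],  # ix == 1 -> Vertical -
--     [ "right", "r", "rt",   "east", "e"                                     ],  # ix == 2 -> Horizontal -
--     [ "left", "l", "lt",    "west", "w"                                     ],  # ix == 3 -> Horizontal +
-- ]
--
-- # Two orthogonal partitions of the word set: axis words (vertical vs horizontal)
-- # and sign words (negative = bottom/right).  The pair is assembled componentwise
-- # instead of dispatching on a group index.
-- _VERTICAL = frozenset(valid_directions[0]) | frozenset(valid_directions[1])
-- _HORIZONTAL = frozenset(valid_directions[2]) | frozenset(valid_directions[3])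
-- _NEGATIVE = frozenset(valid_directions[1]) | frozenset(valid_directions[2])
--
-- def direction_to_axiswithflag(direction): # axis_as_vh, negate_flag | None, None
--     key = direction.lower().strip()
--     if key in _VERTICAL:
--         return "v", key in _NEGATIVE
--     if key in _HORIZONTAL:
--         return "h", key in _NEGATIVE
--     return None, None
-- ===== Notes on version B (the rewrite author's own statement) =====
-- stated objective: alternative
-- what changed: Instead of scanning the four ordered groups and mapping the hit group's index to a (axis, flag) pair, B classifies the normalized key against two orthogonal precomputed word partitions (vertical-vs-horizontal for the axis, negative words for the flag) and assembles the pair componentwise, avoiding the per-call normalization of every word.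
import Mathlib
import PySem

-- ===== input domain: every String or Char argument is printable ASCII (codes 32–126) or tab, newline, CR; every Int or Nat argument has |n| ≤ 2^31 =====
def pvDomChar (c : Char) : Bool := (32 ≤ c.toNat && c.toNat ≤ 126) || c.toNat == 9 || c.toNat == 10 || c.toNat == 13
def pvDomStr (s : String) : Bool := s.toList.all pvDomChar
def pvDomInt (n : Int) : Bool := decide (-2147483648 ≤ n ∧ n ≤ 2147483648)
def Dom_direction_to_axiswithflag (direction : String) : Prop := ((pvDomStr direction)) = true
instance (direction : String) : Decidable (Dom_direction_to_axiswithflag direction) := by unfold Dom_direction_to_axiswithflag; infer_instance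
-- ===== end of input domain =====

-- B classifies the normalized key against two orthogonal word partitions (vertical/horizontal for the axis, negative words for the flag) instead of A's indexed group scan (alternative decomposition).


-- ===== PORT A =====
def pvValidDirections : List (List String) :=
  [ [ "top", "t", "tp",     "north", "n",   "up", "u", "over", "above" ],
    [ "bottom", "b", "bt",  "south", "s",   "down", "d", "under", "below" ],
    [ "right", "r", "rt",   "east", "e" ],
    [ "left", "l", "lt",    "west", "w" ] ]

-- the for-loop with early returns, as structural recursion over enumerate(valid_directions)
def pvLoopA (direction : String) : List (Int × List String) → Option String × Option Bool
  | [] => (none, none)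
  | (ix, directions_ent) :: rest =>
    if (directions_ent.map (fun d =>
          if PySem.Str.strip (PySem.Str.lower d) == PySem.Str.strip (PySem.Str.lower direction)
          then true else false)).contains true then
      if ix == 0 then (some "v", some false)
      else if ix == 1 then (some "v", some true)
      else if ix == 2 then (some "h", some true)
      else if ix == 3 then (some "h", some false)
      else pvLoopA direction rest
    else pvLoopA direction rest

def direction_to_axiswithflag (direction : String) : Option String × Option Bool :=
  pvLoopA direction (PySem.List.enumerate pvValidDirections)

-- ===== PORT B =====
-- _VERTICAL = frozenset(valid_directions[0]) | frozenset(valid_directions[1]); likewise the others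
def pvVertical : PySem.Set String :=
  PySem.Set.union (PySem.Set.ofList (pvValidDirections.getD 0 [])) (PySem.Set.ofList (pvValidDirections.getD 1 []))
def pvHorizontal : PySem.Set String :=
  PySem.Set.union (PySem.Set.ofList (pvValidDirections.getD 2 [])) (PySem.Set.ofList (pvValidDirections.getD 3 []))
def pvNegative : PySem.Set String :=
  PySem.Set.union (PySem.Set.ofList (pvValidDirections.getD 1 [])) (PySem.Set.ofList (pvValidDirections.getD 2 []))

def direction_to_axiswithflag_alt (direction : String) : Option String × Option Bool :=
  let key := PySem.Str.strip (PySem.Str.lower direction)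
  if PySem.Set.contains pvVertical key then (some "v", some (PySem.Set.contains pvNegative key))
  else if PySem.Set.contains pvHorizontal key then (some "h", some (PySem.Set.contains pvNegative key))
  else (none, none)

-- ===== PRECONDITION & SPEC =====
def Spec_direction_to_axiswithflag (direction : String) (out : Option String × Option Bool) : Prop := out = direction_to_axiswithflag_alt direction
instance (direction : String) (out : Option String × Option Bool) : Decidable (Spec_direction_to_axiswithflag direction out) := by unfold Spec_direction_to_axiswithflag; infer_instance

-- ===== CLAIM =====
def Claim_equal_direction_to_axiswithflag : Prop := ∀ (direction : String), Dom_direction_to_axiswithflag direction → Spec_direction_to_axiswithflag direction (direction_to_axiswithflag direction)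

-- ===== LEMMAS AND PROOFS =====

-- both ports depend on the input only through the normalized key
set_option maxHeartbeats 2000000 in
theorem pv_key_eq (s : String) :
    direction_to_axiswithflag s = direction_to_axiswithflag_alt s := by
  unfold direction_to_axiswithflag direction_to_axiswithflag_alt
  simp only [pvValidDirections, pvVertical, pvHorizontal, pvNegative,
    PySem.List.enumerate, PySem.List.enumerate_cons,
    pvLoopA, List.map, List.contains,
    ((by decide : PySem.Str.strip (PySem.Str.lower "top") = "top")), ((by decide : PySem.Str.strip (PySem.Str.lower "t") = "t")), ((by decide : PySem.Str.strip (PySem.Str.lower "tp") = "tp")), ((by decide : PySem.Str.strip (PySem.Str.lower "north") = "north")), ((by decide : PySem.Str.strip (PySem.Str.lower "n") = "n")), ((by decide : PySem.Str.strip (PySem.Str.lower "up") = "up")), ((by decide : PySem.Str.strip (PySem.Str.lower "u") = "u")), ((by decide : PySem.Str.strip (PySem.Str.lower "over") = "over")), ((by decide : PySem.Str.strip (PySem.Str.lower "above") = "above")), ((by decide : PySem.Str.strip (PySem.Str.lower "bottom") = "bottom")), ((by decide : PySem.Str.strip (PySem.Str.lower "b") = "b")), ((by decide : PySem.Str.strip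 (PySem.Str.lower "bt") = "bt")), ((by decide : PySem.Str.strip (PySem.Str.lower "south") = "south")), ((by decide : PySem.Str.strip (PySem.Str.lower "s") = "s")), ((by decide : PySem.Str.strip (PySem.Str.lower "down") = "down")), ((by decide : PySem.Str.strip (PySem.Str.lower "d") = "d")), ((by decide : PySem.Str.strip (PySem.Str.lower "under") = "under")), ((by decide : PySem.Str.strip (PySem.Str.lower "below") = "below")), ((by decide : PySem.Str.strip (PySem.Str.lower "right") = "right")), ((by decide : PySem.Str.strip (PySem.Str.lower "r") = "r")), ((by decide : PySem.Str.strip (PySem.Str.lower "rt") = "rt")), ((by decide : PySem.Str.strip (PySem.Str.lower "east") = "east")), ((by decide : PySem.Str.strip (PySem.Str.lower "e") = "e")), ((by decide : PySem.Str.strip (PySem.Str.lower "left") = "left")), ((by decide : PySem.Str.strip (PySem.Str.lower "l") = "l")), ((by decide : PySem.Str.strip (PySem.Str.lower "lt") = "lt")), ((by decide : PySem.Str.strip (PySem.Str.lower "west") = "west")), ((by decide : PySem.Str.strip (PySem.Str.lower "w") = "w"))]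
  generalize PySem.Str.strip (PySem.Str.lower s) = k
  by_cases e0 : ("top" : String) = k
  · subst e0; decide
  by_cases e1 : ("t" : String) = k
  · subst e1; decide
  by_cases e2 : ("tp" : String) = k
  · subst e2; decide
  by_cases e3 : ("north" : String) = k
  · subst e3; decide
  by_cases e4 : ("n" : String) = k
  · subst e4; decide
  by_cases e5 : ("up" : String) = k
  · subst e5; decide
  by_cases e6 : ("u" : String) = k
  · subst e6; decide
  by_cases e7 : ("over" : String) = k
  · subst e7; decide
  by_cases e8 : ("above" : String) = k
  · subst e8; decide
  by_cases e9 : ("bottom" : String) = k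
  · subst e9; decide
  by_cases e10 : ("b" : String) = k
  · subst e10; decide
  by_cases e11 : ("bt" : String) = k
  · subst e11; decide
  by_cases e12 : ("south" : String) = k
  · subst e12; decide
  by_cases e13 : ("s" : String) = k
  · subst e13; decide
  by_cases e14 : ("down" : String) = k
  · subst e14; decide
  by_cases e15 : ("d" : String) = k
  · subst e15; decide
  by_cases e16 : ("under" : String) = k
  · subst e16; decide
  by_cases e17 : ("below" : String) = k
  · subst e17; decide
  by_cases e18 : ("right" : String) = k
  · subst e18; decide
  by_cases e19 : ("r" : String) = k
  · subst e19; decide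
  by_cases e20 : ("rt" : String) = k
  · subst e20; decide
  by_cases e21 : ("east" : String) = k
  · subst e21; decide
  by_cases e22 : ("e" : String) = k
  · subst e22; decide
  by_cases e23 : ("left" : String) = k
  · subst e23; decide
  by_cases e24 : ("l" : String) = k
  · subst e24; decide
  by_cases e25 : ("lt" : String) = k
  · subst e25; decide
  by_cases e26 : ("west" : String) = k
  · subst e26; decide
  by_cases e27 : ("w" : String) = k
  · subst e27; decide
  simp [PySem.Set.contains, PySem.Set.union, PySem.Set.ofList, PySem.Set.add,
    e0, e1, e2, e3, e4, e5, e6, e7, e8, e9, e10, e11, e12, e13, e14, e15, e16, e17, e18, e19, e20, e21, e22, e23, e24, e25, e26, e27, Ne.symm e0, Ne.symm e1, Ne.symm e2, Ne.symm e3, Ne.symm e4, Ne.symm e5, Ne.symm e6, Ne.symm e7, Ne.symm e8, Ne.symm e9, Ne.symm e10, Ne.symm e11, Ne.symm e12, Ne.symm e13, Ne.symm e14, Ne.symm e15, Ne.symm e16, Ne.symm e17, Ne.symm e18, Ne.symm e19, Ne.symm e20, Ne.symm e21, Ne.symm e22, Ne.symm e23, Ne.symm e24, Ne.symm e25, Ne.symm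 e26, Ne.symm e27]

-- ===== VERDICT =====
theorem direction_to_axiswithflag_spec : Claim_equal_direction_to_axiswithflag := by
  intro direction _
  unfold Spec_direction_to_axiswithflag
  exact pv_key_eq direction
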